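-- pv_equiv track=rewrite | github.com/JoaoVictorCRP/Questionario_PerfilSocioeconomico_FATEC | funcoesImportantes.py | processar_moradia
-- ===== SOURCE A (Python) =====
-- def processar_moradia(dados_moradia):
--     '''Essa é a função que processa o tempo de moradia, transformando meses em anos!
--
--     Param dados_moradias -> valores originais da coluna'''
--
--     respostas = {}
--     menoscincoanos = 0
--     cincodezanos = 0
--     onzevinteanos = 0
--     maisvinte = 0
--     for meses in dados_moradia:
--         anos = meses // 12
--         if anos < 5:
--             menoscincoanos += 1
--         elif anos >= 5 and anos <=10:
--             cincodezanos += 1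
--         elif anos >= 11 and anos <= 20:
--             onzevinteanos += 1
--         else:
--             maisvinte +=1
--     respostas['Menos de 5 anos'] = menoscincoanos
--     respostas['5 a 10 anos'] = cincodezanos
--     respostas['11 a 20 anos'] = onzevinteanos
--     respostas['Mais de 20 anos'] = maisvinte
--
--     return respostas
-- ===== SOURCE B (Python) =====
-- def processar_moradia(dados_moradia):
--     anos = [meses // 12 for meses in dados_moradia]
--     n = len(anos)
--     c5 = sum(a < 5 for a in anos)
--     c11 = sum(a < 11 for a in anos)
--     c21 = sum(a < 21 for a in anos)
--     return {'Menos de 5 anos': c5,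
--             '5 a 10 anos': c11 - c5,
--             '11 a 20 anos': c21 - c11,
--             'Mais de 20 anos': n - c21}
-- ===== Notes on version B (the rewrite author's own statement) =====
-- stated objective: alternative
-- what changed: Instead of classifying each element into one of four buckets in a single loop, B computes cumulative counts below each threshold (years < 5, < 11, < 21) in staged passes and derives the four bin counts as differences of these cumulative counts.
import Mathlib
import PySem

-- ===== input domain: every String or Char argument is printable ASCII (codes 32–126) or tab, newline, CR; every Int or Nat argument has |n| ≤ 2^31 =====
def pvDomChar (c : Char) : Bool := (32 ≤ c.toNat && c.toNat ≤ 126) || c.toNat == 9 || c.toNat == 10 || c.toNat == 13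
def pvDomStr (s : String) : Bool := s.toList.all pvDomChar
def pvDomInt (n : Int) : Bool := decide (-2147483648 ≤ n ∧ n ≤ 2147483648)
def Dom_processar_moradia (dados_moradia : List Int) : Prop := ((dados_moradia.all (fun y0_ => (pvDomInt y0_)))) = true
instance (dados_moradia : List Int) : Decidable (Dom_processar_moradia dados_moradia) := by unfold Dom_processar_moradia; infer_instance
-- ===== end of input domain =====

-- B replaces A's single classify-into-four-buckets loop with staged cumulative
-- threshold counts (years < 5, < 11, < 21) combined by subtraction (objective: alternative).

-- ===== PORT A =====
-- the four counters as a tuple, updated exactly as A's branch cascade does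
def processar_moradia (dados_moradia : List Int) : List (String × Int) :=
  let s := dados_moradia.foldl
    (fun (s : Int × Int × Int × Int) meses =>
      let anos := PySem.Int.floordiv meses 12
      if anos < 5 then (s.1 + 1, s.2.1, s.2.2.1, s.2.2.2)
      else if 5 ≤ anos ∧ anos ≤ 10 then (s.1, s.2.1 + 1, s.2.2.1, s.2.2.2)
      else if 11 ≤ anos ∧ anos ≤ 20 then (s.1, s.2.1, s.2.2.1 + 1, s.2.2.2)
      else (s.1, s.2.1, s.2.2.1, s.2.2.2 + 1))
    (0, 0, 0, 0)
  [("Menos de 5 anos", s.1), ("5 a 10 anos", s.2.1),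
   ("11 a 20 anos", s.2.2.1), ("Mais de 20 anos", s.2.2.2)]

-- ===== PORT B =====
-- sum(a < t for a in anos) = number of elements below the threshold
def processar_moradia_alt (dados_moradia : List Int) : List (String × Int) :=
  let anos := dados_moradia.map (fun meses => PySem.Int.floordiv meses 12)
  let n : Int := anos.length
  let c5 : Int := anos.countP (fun a => a < 5)
  let c11 : Int := anos.countP (fun a => a < 11)
  let c21 : Int := anos.countP (fun a => a < 21)
  [("Menos de 5 anos", c5), ("5 a 10 anos", c11 - c5),
   ("11 a 20 anos", c21 - c11), ("Mais de 20 anos", n - c21)]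

-- ===== PRECONDITION & SPEC =====
def Spec_processar_moradia (dados_moradia : List Int) (out : List (String × Int)) : Prop := out = processar_moradia_alt dados_moradia
instance (dados_moradia : List Int) (out : List (String × Int)) : Decidable (Spec_processar_moradia dados_moradia out) := by unfold Spec_processar_moradia; infer_instance

-- ===== CLAIM (what is proved, stated in full; the proofs are below) =====
def Claim_equal_processar_moradia : Prop := ∀ (dados_moradia : List Int), Dom_processar_moradia dados_moradia → Spec_processar_moradia dados_moradia (processar_moradia dados_moradia)

-- ===== LEMMAS AND PROOFS =====

-- A's running counters equal the start counters plus the cumulative-count differences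
theorem pv_fold_counts (l : List Int) (a b c d : Int) :
    l.foldl
      (fun (s : Int × Int × Int × Int) meses =>
        let anos := PySem.Int.floordiv meses 12
        if anos < 5 then (s.1 + 1, s.2.1, s.2.2.1, s.2.2.2)
        else if 5 ≤ anos ∧ anos ≤ 10 then (s.1, s.2.1 + 1, s.2.2.1, s.2.2.2)
        else if 11 ≤ anos ∧ anos ≤ 20 then (s.1, s.2.1, s.2.2.1 + 1, s.2.2.2)
        else (s.1, s.2.1, s.2.2.1, s.2.2.2 + 1))
      (a, b, c, d)
    = (a + ((l.map (fun m => PySem.Int.floordiv m 12)).countP (fun x => x < 5) : Int),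
       b + (((l.map (fun m => PySem.Int.floordiv m 12)).countP (fun x => x < 11) : Int)
            - ((l.map (fun m => PySem.Int.floordiv m 12)).countP (fun x => x < 5) : Int)),
       c + (((l.map (fun m => PySem.Int.floordiv m 12)).countP (fun x => x < 21) : Int)
            - ((l.map (fun m => PySem.Int.floordiv m 12)).countP (fun x => x < 11) : Int)),
       d + ((l.length : Int)
            - ((l.map (fun m => PySem.Int.floordiv m 12)).countP (fun x => x < 21) : Int))) := by
  induction l generalizing a b c d with
  | nil => simp
  | cons x xs ih =>
    simp only [List.foldl_cons, List.map_cons, List.countP_cons, List.length_cons]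
    set y := PySem.Int.floordiv x 12 with hy
    by_cases h1 : y < 5
    · rw [if_pos h1, ih]
      have e5 : decide (y < 5) = true := by simpa using h1
      have e11 : decide (y < 11) = true := by simp; omega
      have e21 : decide (y < 21) = true := by simp; omega
      simp [Prod.ext_iff, e5, e11, e21]; omega
    · by_cases h2 : y ≤ 10
      · rw [if_neg h1, if_pos ⟨by omega, h2⟩, ih]
        have e5 : decide (y < 5) = false := by simpa using h1
        have e11 : decide (y < 11) = true := by simp; omega
        have e21 : decide (y < 21) = true := by simp; omega
        simp [Prod.ext_iff, e5, e11, e21]; omega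
      · by_cases h3 : y ≤ 20
        · rw [if_neg h1, if_neg (by omega), if_pos ⟨by omega, h3⟩, ih]
          have e5 : decide (y < 5) = false := by simpa using h1
          have e11 : decide (y < 11) = false := by simp; omega
          have e21 : decide (y < 21) = true := by simp; omega
          simp [Prod.ext_iff, e5, e11, e21]; omega
        · rw [if_neg h1, if_neg (by omega), if_neg (by omega), ih]
          have e5 : decide (y < 5) = false := by simpa using h1
          have e11 : decide (y < 11) = false := by simp; omega
          have e21 : decide (y < 21) = false := by simp; omega
          simp [Prod.ext_iff, e5, e11, e21]; omega

-- ===== VERDICT (by name: the statement is the Claim_ definition above) =====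
theorem processar_moradia_spec : Claim_equal_processar_moradia := by
  intro l _
  unfold Spec_processar_moradia processar_moradia processar_moradia_alt
  rw [pv_fold_counts]
  simp
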